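-- pv_equiv track=rewrite | github.com/HemachanduIT/100_codess | TCS_codevita/program f.py | cube_is_faulty
-- ===== SOURCE A (Python) =====
-- def cube_is_faulty(cube):
--     """Checks if cube has exactly one color anomaly."""
--     freq = {}
--     for grid in cube.values():
--         for row in grid:
--             for cell in row:
--                 freq[cell] = freq.get(cell, 0) + 1
--     total = sum(freq.values())
--     dominant = max(freq.values())
--     return total - dominant == 1
-- ===== SOURCE B (Python) =====
-- def cube_is_faulty(cube):
--     """Checks if cube has exactly one color anomaly."""
--     cells = [cell for grid in cube.values() for row in grid for cell in row]
--     n = len(cells)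
--     if n < 2:
--         return False
--     # Exactly one anomaly means some color covers n-1 cells; at most one
--     # cell is off-color, so at least one of the first two cells carries
--     # the dominant color.
--     return cells.count(cells[0]) == n - 1 or cells.count(cells[1]) == n - 1
-- ===== Notes on version B (the rewrite author's own statement) =====
-- stated objective: alternative
-- what changed: Replaces the frequency-dictionary + sum/max computation by a flatten-and-count argument: exactly one anomaly iff some color occupies n-1 of the n cells, and such a color must appear among the first two cells, so two list.count passes answer the question with no dictionary at all.
-- outside the precondition, e.g. on cube_is_faulty({}): A raises ValueError, B returns False
import Mathlib
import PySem

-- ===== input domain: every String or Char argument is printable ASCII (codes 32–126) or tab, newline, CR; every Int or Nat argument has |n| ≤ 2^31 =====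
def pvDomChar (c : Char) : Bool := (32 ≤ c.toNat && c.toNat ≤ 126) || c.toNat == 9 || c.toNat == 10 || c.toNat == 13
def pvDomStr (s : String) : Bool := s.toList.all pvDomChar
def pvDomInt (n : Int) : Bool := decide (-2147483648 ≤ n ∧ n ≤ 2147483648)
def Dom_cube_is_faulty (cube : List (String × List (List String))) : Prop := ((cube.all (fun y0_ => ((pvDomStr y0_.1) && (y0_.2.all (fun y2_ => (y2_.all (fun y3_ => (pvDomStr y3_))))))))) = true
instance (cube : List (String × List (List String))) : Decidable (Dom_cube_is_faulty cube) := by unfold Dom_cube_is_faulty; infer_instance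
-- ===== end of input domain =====

-- B replaces A's frequency dictionary by a counting argument on the flattened cell
-- list (the dominant color of a one-anomaly cube must appear among the first two
-- cells); alternative decomposition, similar cost.

-- ===== PORT A =====
def cube_is_faulty (cube : List (String × List (List String))) : Bool :=
  let freq := cube.foldl (fun freq grid =>
      grid.2.foldl (fun freq row =>
        row.foldl (fun freq cell => freq.insert cell (freq.getD cell 0 + 1)) freq) freq)
    (PySem.Dict.empty : PySem.Dict String Int)
  let total : Int := freq.values.sum
  match PySem.List.max? freq.values (fun v => v) with
  | some dominant => decide (total - dominant = 1)
  | none => false    -- Python's max() raises ValueError here; excluded by Pre_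

-- ===== PORT B =====
def cube_is_faulty_alt (cube : List (String × List (List String))) : Bool :=
  let cells := cube.flatMap (fun grid => grid.2.flatMap (fun row => row))
  let n : Int := cells.length
  if n < 2 then false
  else
    match cells with
    | c0 :: c1 :: _ =>
        decide ((PySem.List.count cells c0 : Int) = n - 1)
          || decide ((PySem.List.count cells c1 : Int) = n - 1)
    | _ => false   -- unreachable: n ≥ 2

-- ===== PRECONDITION & SPEC =====
-- Pre_ excludes exactly the cubes with no cells at all, on which A's max() raises ValueError.
def Pre_cube_is_faulty (cube : List (String × List (List String))) : Prop :=
  cube.any (fun grid => grid.2.any (fun row => !row.isEmpty)) = true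
instance (cube : List (String × List (List String))) : Decidable (Pre_cube_is_faulty cube) := by unfold Pre_cube_is_faulty; infer_instance
def pvWitness_cube_is_faulty : (List (String × List (List String))) := [("g", [["a", "b"]])]

def Spec_cube_is_faulty (cube : List (String × List (List String))) (out : Bool) : Prop := out = cube_is_faulty_alt cube
instance (cube : List (String × List (List String))) (out : Bool) : Decidable (Spec_cube_is_faulty cube out) := by unfold Spec_cube_is_faulty; infer_instance

-- ===== CLAIM (what is proved, stated in full; the proofs are below) =====
def Claim_equal_cube_is_faulty : Prop := ∀ (cube : List (String × List (List String))), Dom_cube_is_faulty cube → Pre_cube_is_faulty cube → Spec_cube_is_faulty cube (cube_is_faulty cube)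

-- ===== LEMMAS AND PROOFS =====

-- the flattened cell list, in A's (and B's) traversal order
def pvCells (cube : List (String × List (List String))) : List String :=
  cube.flatMap (fun grid => grid.2.flatMap (fun row => row))

theorem pvCells_def (cube : List (String × List (List String))) :
    pvCells cube = cube.flatMap (fun grid => grid.2.flatMap (fun row => row)) := rfl

-- folding over a flatMap is the nested fold
theorem pv_foldl_flatMap {α β σ : Type} (l : List α) (f : α → List β) (g : σ → β → σ) (init : σ) :
    (l.flatMap f).foldl g init = l.foldl (fun s x => (f x).foldl g s) init := by
  induction l generalizing init with
  | nil => rfl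
  | cons a t ih => simp [List.flatMap_cons, List.foldl_append, ih]

-- A's nested dict-building loops produce Counter(cells)
theorem pv_freq_eq_counter (cube : List (String × List (List String))) :
    cube.foldl (fun freq grid =>
      grid.2.foldl (fun freq row =>
        row.foldl (fun freq cell => freq.insert cell (freq.getD cell 0 + 1)) freq) freq)
      (PySem.Dict.empty : PySem.Dict String Int)
    = PySem.Dict.counter (pvCells cube) := by
  rw [← PySem.Dict.foldl_insert_getD_add_one_eq_counter, pvCells, pv_foldl_flatMap]
  apply List.foldl_ext
  intro d grid _
  exact (pv_foldl_flatMap grid.2 (fun row => row) _ d).symm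

theorem pv_values_counter (L : List String) :
    (PySem.Dict.counter L).values = (PySem.Set.ofList L).map (fun k => (L.count k : Int)) := by
  simp [PySem.Dict.values, PySem.Dict.items_counter, List.map_map, Function.comp]

theorem pv_sum_counts (L : List String) :
    ((PySem.Set.ofList L).map (fun k => (L.count k : Int))).sum = (L.length : Int) := by
  have hnd : (PySem.Set.ofList L : List String).Nodup := PySem.Set.nodup_ofList L
  have hfs : (PySem.Set.ofList L : List String).toFinset = L.toFinset := by
    apply Finset.ext; intro x; simp [PySem.Set.mem_ofList]
  have h1 : ((PySem.Set.ofList L).map (fun k => L.count k)).sum = L.length := by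
    calc ((PySem.Set.ofList L).map (fun k => L.count k)).sum
        = ∑ x ∈ (PySem.Set.ofList L : List String).toFinset, L.count x :=
          (List.sum_toFinset _ hnd).symm
      _ = ∑ x ∈ L.toFinset, L.count x := by rw [hfs]
      _ = L.length := List.sum_toFinset_count_eq_length L
  calc ((PySem.Set.ofList L).map (fun k => (L.count k : Int))).sum
      = ((((PySem.Set.ofList L).map (fun k => L.count k)).map (fun n : Nat => (n : Int)))).sum := by
        rw [List.map_map]; rfl
    _ = ((((PySem.Set.ofList L).map (fun k => L.count k)).sum : Nat) : Int) :=
        (Nat.cast_list_sum _).symm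
    _ = (L.length : Int) := by rw [h1]

-- B's decision, as a function of the flattened cell list
def pvBody (L : List String) : Bool :=
  if (L.length : Int) < 2 then false
  else match L with
    | c0 :: c1 :: _ =>
        decide ((L.count c0 : Int) = (L.length : Int) - 1)
          || decide ((L.count c1 : Int) = (L.length : Int) - 1)
    | _ => false

-- the combinatorial heart: total − max-count = 1 iff one of the first two cells has count n−1
theorem pv_key (L : List String) (m : Int)
    (h : PySem.List.max? ((PySem.Set.ofList L).map (fun k => (L.count k : Int))) (fun v => v) = some m) :
    decide ((L.length : Int) - m = 1) = pvBody L := by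
  obtain ⟨k, hk, hkm⟩ := List.mem_map.mp (PySem.List.max?_mem h)
  have hkL : k ∈ L := (PySem.Set.mem_ofList _ _).mp hk
  have hmax : ∀ x ∈ L, (L.count x : Int) ≤ m := by
    intro x hx
    exact PySem.List.max?_isMax h _ (List.mem_map.mpr ⟨x, (PySem.Set.mem_ofList _ _).mpr hx, rfl⟩)
  rcases L with _ | ⟨c0, _ | ⟨c1, t⟩⟩
  · exact absurd hkL (by simp)
  · have hkc : k = c0 := by simpa using hkL
    subst hkc
    have hm : m = 1 := by simpa using hkm.symm
    subst hm
    simp [pvBody]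
  · simp only [pvBody]
    have hn : ¬ (((c0 :: c1 :: t).length : Int) < 2) := by
        simp only [List.length_cons]; push_cast; omega
    simp only [if_neg hn]
    have hiff : (((c0 :: c1 :: t).length : Int) - m = 1) ↔
        (((c0 :: c1 :: t).count c0 : Int) = ((c0 :: c1 :: t).length : Int) - 1 ∨
         ((c0 :: c1 :: t).count c1 : Int) = ((c0 :: c1 :: t).length : Int) - 1) := by
      constructor
      · intro h1
        by_cases h0 : k = c0
        · subst h0; exact Or.inl (by omega)
        by_cases h1' : k = c1
        · subst h1'; exact Or.inr (by omega)
        · exfalso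
          have h0' : ¬ (c0 = k) := fun hh => h0 hh.symm
          have h1'' : ¬ (c1 = k) := fun hh => h1' hh.symm
          have hct : (c0 :: c1 :: t).count k = t.count k := by
            simp [h0', h1'']
          have hle : t.count k ≤ t.length := List.count_le_length
          have hlen : ((c0 :: c1 :: t).length : Int) = (t.length : Int) + 2 := by
            simp only [List.length_cons]; push_cast; ring
          have hki : ((t.count k : Nat) : Int) = m := by rw [← hct]; exact_mod_cast hkm
          have hle' : ((t.count k : Nat) : Int) ≤ ((t.length : Nat) : Int) := by
            exact_mod_cast hle
          omega
      · intro h2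
        have hlen : ((c0 :: c1 :: t).length : Int) = (t.length : Int) + 2 := by
          simp only [List.length_cons]; push_cast; ring
        have hcmem : ∀ c, c ∈ (c0 :: c1 :: t) →
            ((c0 :: c1 :: t).count c : Int) = ((c0 :: c1 :: t).length : Int) - 1 →
            ((c0 :: c1 :: t).length : Int) - m = 1 := by
          intro c hc hcnt
          have hcl : (c0 :: c1 :: t).count k ≤ (c0 :: c1 :: t).length :=
            List.count_le_length
          have hcl' : (((c0 :: c1 :: t).count k : Nat) : Int) ≤ (((c0 :: c1 :: t).length : Nat) : Int) := by
            exact_mod_cast hcl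
          have hlb : ((c0 :: c1 :: t).length : Int) - 1 ≤ m := by
            have := hmax c hc; omega
          have hne : m ≠ ((c0 :: c1 :: t).length : Int) := by
            intro hmn
            have hkn : (c0 :: c1 :: t).count k = (c0 :: c1 :: t).length := by omega
            have hall : ∀ b ∈ (c0 :: c1 :: t), k = b := List.count_eq_length.mp hkn
            have hck : c = k := (hall c hc).symm
            rw [hck] at hcnt
            have hkn' : (((c0 :: c1 :: t).count k : Nat) : Int) = (((c0 :: c1 :: t).length : Nat) : Int) := by
              exact_mod_cast hkn
            omega
          omega
        rcases h2 with h2 | h2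
        · exact hcmem c0 (by simp) h2
        · exact hcmem c1 (by simp) h2
    simp only [hiff]
    by_cases hb0 : ((c0 :: c1 :: t).count c0 : Int) = ((c0 :: c1 :: t).length : Int) - 1 <;>
      by_cases hb1 : ((c0 :: c1 :: t).count c1 : Int) = ((c0 :: c1 :: t).length : Int) - 1 <;>
      simp [hb1]


-- ===== VERDICT (by name: the statement is the Claim_ definition above) =====
theorem cube_is_faulty_spec : Claim_equal_cube_is_faulty := by
  intro cube _ hpre
  show cube_is_faulty cube = cube_is_faulty_alt cube
  have hC : pvCells cube ≠ [] := by
    intro hnil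
    obtain ⟨g, hg, hga⟩ := List.any_eq_true.mp hpre
    obtain ⟨r, hr, hra⟩ := List.any_eq_true.mp hga
    have hrne : r ≠ [] := by simpa using hra
    rw [pvCells, List.flatMap_eq_nil_iff] at hnil
    have h2 := hnil _ hg
    rw [List.flatMap_eq_nil_iff] at h2
    exact hrne (h2 _ hr)
  have hA : cube_is_faulty cube
      = (match PySem.List.max? ((PySem.Set.ofList (pvCells cube)).map (fun k => ((pvCells cube).count k : Int))) (fun v => v) with
         | some m => decide (((pvCells cube).length : Int) - m = 1)
         | none => false) := by
    simp only [cube_is_faulty, pv_freq_eq_counter, pv_values_counter, pv_sum_counts]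
  have hB : ∀ L : List String, L = pvCells cube → cube_is_faulty_alt cube = pvBody L := by
    intro L hL
    simp only [cube_is_faulty_alt, PySem.List.count_eq, ← pvCells_def, ← hL]
    cases L with
    | nil => simp [pvBody]
    | cons c tl =>
        cases tl with
        | nil => simp [pvBody]
        | cons c1 t => simp [pvBody]
  rw [hA, hB (pvCells cube) rfl]
  cases hmax : PySem.List.max? ((PySem.Set.ofList (pvCells cube)).map (fun k => ((pvCells cube).count k : Int))) (fun v => v) with
  | none =>
      exfalso
      have hmap := (PySem.List.max?_eq_none_iff _ _).mp hmax
      rcases hx : pvCells cube with _ | ⟨c, t⟩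
      · exact hC hx
      · have hcm : c ∈ PySem.Set.ofList (pvCells cube) :=
          (PySem.Set.mem_ofList _ _).mpr (by rw [hx]; simp)
        rw [List.map_eq_nil_iff.mp hmap] at hcm
        simp at hcm
  | some m =>
      show decide (((pvCells cube).length : Int) - m = 1) = pvBody (pvCells cube)
      exact pv_key (pvCells cube) m hmax
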